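-- pv_equiv track=rewrite | github.com/Checkmk/checkmk | cmk/base/legacy_checks/brocade.py | check_brocade_power
-- ===== SOURCE A (Python) =====
-- def saveint(i: str) -> int:
--     """Tries to cast a string to an integer and return it. In case this
--     fails, it returns 0.
--
--     Advice: Please don't use this function in new code. It is understood as
--     bad style these days, because in case you get 0 back from this function,
--     you can not know whether it is really 0 or something went wrong."""
--     try:
--         return int(i)
--     except (TypeError, ValueError):
--         return 0
--
-- def brocade_sensor_convert(info, what):
--     return_list = []
--     for presence, state, name in info:
--         name = name.lstrip()  # remove leading spaces provided via SNMP
--         if name.startswith(what) and presence != "6" and (saveint(state) > 0 or what == "Power"):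
--             sensor_id = name.split("#")[-1]
--             return_list.append([sensor_id, name, state])
--     return return_list
--
-- def check_brocade_power(item, _no_params, info):
--     converted = brocade_sensor_convert(info, "Power")
--     for snmp_item, name, value in converted:
--         if item == snmp_item:
--             value = int(value)
--             if value != 1:
--                 return 2, "Error on supply %s" % name
--             return 0, "No problems found"
--
--     return 3, "Supply not found"
-- ===== SOURCE B (Python) =====
-- def check_brocade_power(item, _no_params, info):
--     # single pass over info: no intermediate converted list
--     for presence, state, name in info:
--         name = name.lstrip()
--         if name.startswith("Power") and presence != "6" and name.split("#")[-1] == item: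
--             if int(state) != 1:
--                 return 2, "Error on supply %s" % name
--             return 0, "No problems found"
--     return 3, "Supply not found"
-- ===== Notes on version B (the rewrite author's own statement) =====
-- stated objective: simpler
-- what changed: Fused the two-stage design (build the full converted sensor list, then scan it for the item) into one direct pass over info that tests the item id inline and returns at the first match, dropping the brocade_sensor_convert and saveint helpers (saveint's branch is vacuous for what='Power').
import Mathlib
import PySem

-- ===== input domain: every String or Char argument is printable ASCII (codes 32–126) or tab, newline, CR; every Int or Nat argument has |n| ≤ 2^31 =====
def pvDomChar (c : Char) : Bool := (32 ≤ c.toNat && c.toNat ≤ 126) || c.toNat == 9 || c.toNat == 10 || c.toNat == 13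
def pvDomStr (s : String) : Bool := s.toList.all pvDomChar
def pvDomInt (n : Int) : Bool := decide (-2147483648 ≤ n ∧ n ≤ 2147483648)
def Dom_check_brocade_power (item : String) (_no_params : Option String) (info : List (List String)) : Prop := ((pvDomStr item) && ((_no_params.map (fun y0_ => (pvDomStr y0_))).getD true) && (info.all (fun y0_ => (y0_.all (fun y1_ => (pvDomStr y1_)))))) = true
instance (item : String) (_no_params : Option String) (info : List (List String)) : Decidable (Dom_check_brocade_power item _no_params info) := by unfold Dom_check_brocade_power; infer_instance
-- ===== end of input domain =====

-- B fuses A's build-list-then-scan into one direct pass over info (objective: simpler); equal return value on Pre_.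

-- ===== PORT A =====
def saveint (i : String) : Int := (PySem.Int.ofStr? i).getD 0  -- int(i), 0 on ValueError

def brocade_sensor_convert (info : List (List String)) (what : String) : List (List String) :=
  info.foldl (fun return_list row =>
    match row with
    | [presence, state, name0] =>
      let name := PySem.Str.lstrip name0
      if PySem.Str.startswith name what && presence != "6" && (decide (saveint state > 0) || what == "Power") then
        let sensor_id := ((PySem.Str.split? name "#").getD []).getLastD ""   -- name.split("#")[-1]
        return_list ++ [[sensor_id, name, state]]
      else return_list
    | _ => return_list) []   -- a row of length ≠ 3 raises in Python; outside Pre_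

def check_brocade_power_scan (item : String) : List (List String) → Int × String
  | [] => (3, "Supply not found")
  | row :: rest =>
    match row with
    | [snmp_item, name, value] =>
      if item == snmp_item then
        let v := (PySem.Int.ofStr? value).getD 0   -- int(value); ValueError outside Pre_
        if v != 1 then (2, "Error on supply " ++ name) else (0, "No problems found")
      else check_brocade_power_scan item rest
    | _ => check_brocade_power_scan item rest

def check_brocade_power (item : String) (_no_params : Option String) (info : List (List String)) : Int × String :=
  check_brocade_power_scan item (brocade_sensor_convert info "Power")

-- ===== PORT B =====
def check_brocade_power_go (item : String) : List (List String) → Int × String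
  | [] => (3, "Supply not found")
  | row :: rest =>
    match row with
    | [presence, state, name0] =>
      let name := PySem.Str.lstrip name0
      if PySem.Str.startswith name "Power" && presence != "6" &&
          (((PySem.Str.split? name "#").getD []).getLastD "" == item) then
        if (PySem.Int.ofStr? state).getD 0 != 1 then (2, "Error on supply " ++ name)
        else (0, "No problems found")
      else check_brocade_power_go item rest
    | _ => check_brocade_power_go item rest

def check_brocade_power_alt (item : String) (_no_params : Option String) (info : List (List String)) : Int × String :=
  check_brocade_power_go item info

-- ===== PRECONDITION & SPEC =====
def pvMatchRow (item : String) (row : List String) : Bool :=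
  match row with
  | [presence, _, name0] =>
    let name := PySem.Str.lstrip name0
    PySem.Str.startswith name "Power" && presence != "6" &&
      (((PySem.Str.split? name "#").getD []).getLastD "" == item)
  | _ => false

-- Pre_ excludes exactly the inputs where Python A raises: a row that is not a triple
-- (unpacking ValueError) or a first matching power-supply row whose state is not int-parsable.
def Pre_check_brocade_power (item : String) (_no_params : Option String) (info : List (List String)) : Prop :=
  (info.all (fun r => r.length == 3)) = true ∧
  ((info.filter (pvMatchRow item)).head?.all
      (fun r => (PySem.Int.ofStr? (r.getD 1 "")).isSome)) = true

instance (item : String) (_no_params : Option String) (info : List (List String)) : Decidable (Pre_check_brocade_power item _no_params info) := by unfold Pre_check_brocade_power; infer_instance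

def pvWitness_check_brocade_power : String × Option String × List (List String) :=
  ("1", none, [["1", "1", " Power#1"]])

def Spec_check_brocade_power (item : String) (_no_params : Option String) (info : List (List String)) (out : Int × String) : Prop := out = check_brocade_power_alt item _no_params info
instance (item : String) (_no_params : Option String) (info : List (List String)) (out : Int × String) : Decidable (Spec_check_brocade_power item _no_params info out) := by unfold Spec_check_brocade_power; infer_instance

-- ===== CLAIM (what is proved, stated in full; the proofs are below) =====
def Claim_equal_check_brocade_power : Prop := ∀ (item : String) (_no_params : Option String) (info : List (List String)), Dom_check_brocade_power item _no_params info → Pre_check_brocade_power item _no_params info → Spec_check_brocade_power item _no_params info (check_brocade_power item _no_params info)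

-- ===== LEMMAS AND PROOFS =====

-- the per-row contribution of A's converting loop
def convRow (what : String) (row : List String) : List (List String) :=
  match row with
  | [presence, state, name0] =>
    let name := PySem.Str.lstrip name0
    if PySem.Str.startswith name what && presence != "6" && (decide (saveint state > 0) || what == "Power") then
      [[((PySem.Str.split? name "#").getD []).getLastD "", name, state]]
    else []
  | _ => []

theorem brocade_sensor_convert_eq (info : List (List String)) (what : String) :
    brocade_sensor_convert info what = info.flatMap (convRow what) := by
  have h : brocade_sensor_convert info what =
      info.foldl (fun acc row => acc ++ convRow what row) [] := by
    unfold brocade_sensor_convert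
    congr 1
    funext acc row
    rcases row with _ | ⟨p, _ | ⟨s, _ | ⟨n, _ | ⟨x, xs⟩⟩⟩⟩ <;> simp [convRow]
    split <;> simp
  rw [h, PySem.List.foldl_append_eq_flatMap]
  simp

theorem scan_convert (item : String) (info : List (List String)) :
    check_brocade_power_scan item (info.flatMap (convRow ("Power"))) =
      check_brocade_power_go item info := by
  induction info with
  | nil => simp [check_brocade_power_scan, check_brocade_power_go]
  | cons row rest ih =>
    rcases row with _ | ⟨p, _ | ⟨s, _ | ⟨n, _ | ⟨x, xs⟩⟩⟩⟩ <;>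
      simp only [List.flatMap_cons, convRow, check_brocade_power_go]
    · simpa using ih
    · simpa using ih
    · simpa using ih
    · -- the triple case
      by_cases hs : PySem.Chars.startswith (PySem.Chars.lstrip n.toList) ['P','o','w','e','r'] = true
      · by_cases hp : p = "6"
        · simp [hs, hp, ih]
        · by_cases hi : ((PySem.Str.split? (PySem.Str.lstrip n) "#").getD []).getLast?.getD "" = item
          · subst hi
            simp [hs, hp, check_brocade_power_scan]
          · have hi' : ¬ item = ((PySem.Str.split? (PySem.Str.lstrip n) "#").getD []).getLast?.getD "" :=
              fun h => hi h.symm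
            simp [hs, hp, hi, hi', check_brocade_power_scan, ih]
      · simp [hs, ih]
    · simpa using ih

theorem check_brocade_power_spec : Claim_equal_check_brocade_power := by
  intro item _no_params info _hdom _hpre
  unfold Spec_check_brocade_power check_brocade_power check_brocade_power_alt
  rw [brocade_sensor_convert_eq, scan_convert]
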